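-- pv_equiv track=rewrite | github.com/gyfis/rawted | rna_tree.py | _dbn_swapped
-- ===== SOURCE A (Python) =====
-- def _dbn_swapped(dbn: str) -> bool:
--     bad_brackets = ['[', ']']
--     good_brackets = ['(', ')']
--
--     met_bad_brackets = False
--
--     for c in dbn:
--         if c in good_brackets:
--             return met_bad_brackets
--         if c in bad_brackets:
--             met_bad_brackets = True
--
--     return False
-- ===== SOURCE B (Python) =====
-- def _dbn_swapped(dbn: str) -> bool:
--     g = next((i for i, c in enumerate(dbn) if c in '()'), None)
--     if g is None:
--         return False
--     b = next((i for i, c in enumerate(dbn) if c in '[]'), None)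
--     return b is not None and b < g
-- ===== Notes on version B (the rewrite author's own statement) =====
-- stated objective: idiomatic
-- what changed: Replaces A's single stateful scan carrying a met-bad-bracket flag with two independent first-occurrence index searches (first parenthesis, first square bracket) compared by index.
import Mathlib
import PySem

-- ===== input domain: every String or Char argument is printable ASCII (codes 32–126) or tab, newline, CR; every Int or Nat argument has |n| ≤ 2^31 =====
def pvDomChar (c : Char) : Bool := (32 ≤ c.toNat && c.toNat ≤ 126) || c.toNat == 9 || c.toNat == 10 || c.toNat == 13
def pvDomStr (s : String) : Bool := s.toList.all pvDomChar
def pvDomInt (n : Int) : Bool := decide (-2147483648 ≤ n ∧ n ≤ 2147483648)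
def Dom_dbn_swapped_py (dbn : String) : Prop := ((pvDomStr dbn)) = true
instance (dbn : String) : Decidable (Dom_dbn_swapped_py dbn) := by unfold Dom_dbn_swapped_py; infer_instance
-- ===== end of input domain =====

-- B replaces A's single stateful scan (met-bad-bracket flag) with two independent
-- first-occurrence index searches compared by index; idiomatic decomposition, same cost.


-- ===== PORT A =====
-- the for-loop over dbn with the met_bad_brackets flag, early return on a good bracket
def dbnSwappedLoop : List Char → Bool → Bool
  | [], _ => false
  | c :: cs, met =>
    if c == '(' || c == ')' then met
    else if c == '[' || c == ']' then dbnSwappedLoop cs true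
    else dbnSwappedLoop cs met

def dbn_swapped_py (dbn : String) : Bool := dbnSwappedLoop dbn.toList false

-- ===== PORT B =====
-- first index of a parenthesis and of a square bracket (the two `next(... enumerate ...)` searches)
def dbn_swapped_py_alt (dbn : String) : Bool :=
  match List.findIdx? (fun c => c == '(' || c == ')') dbn.toList with
  | none => false
  | some g =>
    match List.findIdx? (fun c => c == '[' || c == ']') dbn.toList with
    | none => false
    | some b => decide (b < g)

-- ===== PRECONDITION & SPEC =====
def Spec_dbn_swapped_py (dbn : String) (out : Bool) : Prop := out = dbn_swapped_py_alt dbn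
instance (dbn : String) (out : Bool) : Decidable (Spec_dbn_swapped_py dbn out) := by unfold Spec_dbn_swapped_py; infer_instance

-- ===== CLAIM (what is proved, stated in full; the proofs are below) =====
def Claim_equal_dbn_swapped_py : Prop := ∀ (dbn : String), Dom_dbn_swapped_py dbn → Spec_dbn_swapped_py dbn (dbn_swapped_py dbn)

-- ===== LEMMAS AND PROOFS =====

-- the loop with flag `met` equals the index-comparison formulation
theorem dbnSwappedLoop_eq (l : List Char) (met : Bool) :
    dbnSwappedLoop l met =
      (match List.findIdx? (fun c => c == '(' || c == ')') l with
       | none => false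
       | some g =>
         met || (match List.findIdx? (fun c => c == '[' || c == ']') l with
                 | none => false
                 | some b => decide (b < g))) := by
  induction l generalizing met with
  | nil => simp [dbnSwappedLoop]
  | cons c cs ih =>
    simp only [dbnSwappedLoop, List.findIdx?_cons]
    by_cases hg : (c == '(' || c == ')') = true
    · have hb : (c == '[' || c == ']') = false := by
        rcases Bool.or_eq_true_iff.mp hg with h | h <;>
          simp [eq_of_beq h]
      simp only [hg, if_true, hb, Bool.false_eq_true, if_false]
      cases hfb : List.findIdx? (fun c => c == '[' || c == ']') cs with
      | none => simp
      | some b => simp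
    · simp only [hg, Bool.false_eq_true, if_false]
      by_cases hb : (c == '[' || c == ']') = true
      · simp only [hb, if_true, ih]
        cases hfg : List.findIdx? (fun c => c == '(' || c == ')') cs with
        | none => simp
        | some g =>
          simp only [Option.map_some]
          cases hfb : List.findIdx? (fun c => c == '[' || c == ']') cs with
          | none => simp
          | some b => simp
      · simp only [hb, if_false, ih, Bool.false_eq_true]
        cases hfg : List.findIdx? (fun c => c == '(' || c == ')') cs with
        | none => simp
        | some g =>
          simp only [Option.map_some]
          cases hfb : List.findIdx? (fun c => c == '[' || c == ']') cs with
          | none => simp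
          | some b => simp only [Option.map_some]; congr 1; simp

-- ===== VERDICT (by name: the statement is the Claim_ definition above) =====
theorem dbn_swapped_py_spec : Claim_equal_dbn_swapped_py := by
  intro dbn _
  unfold Spec_dbn_swapped_py dbn_swapped_py dbn_swapped_py_alt
  rw [dbnSwappedLoop_eq]
  cases List.findIdx? (fun c => c == '(' || c == ')') dbn.toList <;> simp
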